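-- pv_equiv track=rewrite | github.com/BuissonFlorent/LKIT | storage/manager.py | _get_id_from_file_name
-- ===== SOURCE A (Python) =====
-- def _get_id_from_file_name(file_name: str) -> int:
--     """Extract ID from file name"""
--     name_without_extension = file_name.replace('.json', '')
--     digits = ''
--     for char in reversed(name_without_extension):
--         if char.isdigit():
--             digits = char + digits
--         else:
--             break
--     return int(digits) if digits else 0
-- ===== SOURCE B (Python) =====
-- import re
--
-- def _get_id_from_file_name(file_name: str) -> int:
--     """Extract ID from file name"""
--     name_without_extension = file_name.replace('.json', '')
--     m = re.search(r'[0-9]+\Z', name_without_extension)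
--     return int(m.group()) if m else 0
-- ===== Notes on version B (the rewrite author's own statement) =====
-- stated objective: idiomatic
-- what changed: The explicit reversed-character accumulation loop with prepending is replaced by one end-anchored regex search for the trailing digit run.
import Mathlib
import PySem

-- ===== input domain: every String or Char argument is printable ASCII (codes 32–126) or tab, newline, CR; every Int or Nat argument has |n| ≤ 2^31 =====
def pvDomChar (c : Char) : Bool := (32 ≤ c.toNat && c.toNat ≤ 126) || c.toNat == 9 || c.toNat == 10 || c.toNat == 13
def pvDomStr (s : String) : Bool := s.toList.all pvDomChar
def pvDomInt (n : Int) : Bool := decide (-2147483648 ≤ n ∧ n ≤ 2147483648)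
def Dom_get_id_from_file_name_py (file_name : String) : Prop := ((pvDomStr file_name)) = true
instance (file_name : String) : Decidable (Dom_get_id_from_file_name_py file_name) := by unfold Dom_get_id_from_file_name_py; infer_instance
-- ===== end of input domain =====

-- B replaces A's explicit reversed-character accumulation loop by one end-anchored
-- regex search (re.search(r'[0-9]+\Z')) for the trailing digit run (idiomatic).

-- ===== PORT A =====
-- the `for char in reversed(...)` loop: prepend while isdigit, break otherwise
def pvALoop : List Char → List Char → List Char
  | [], digits => digits
  | c :: rest, digits =>
      if PySem.Chars.isdigit c then pvALoop rest (c :: digits) else digits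

def get_id_from_file_name_py (file_name : String) : Int :=
  let name_without_extension := PySem.Str.replace file_name ".json" ""
  let digits := pvALoop name_without_extension.toList.reverse []
  if digits.isEmpty then 0 else (PySem.Int.ofChars? digits).getD 0

-- ===== PORT B =====
-- hand port of re.search(r'[0-9]+\Z', s): the maximal run of ASCII digits at the
-- very end of the string (none if empty); exact on the ASCII domain.
def pvSearchTrailingDigits (cs : List Char) : List Char :=
  (cs.reverse.takeWhile PySem.Chars.isdigit).reverse

def get_id_from_file_name_py_alt (file_name : String) : Int :=
  let name_without_extension := PySem.Str.replace file_name ".json" ""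
  let m := pvSearchTrailingDigits name_without_extension.toList
  if m.isEmpty then 0 else (PySem.Int.ofChars? m).getD 0

-- ===== PRECONDITION & SPEC =====
def Spec_get_id_from_file_name_py (file_name : String) (out : Int) : Prop := out = get_id_from_file_name_py_alt file_name
instance (file_name : String) (out : Int) : Decidable (Spec_get_id_from_file_name_py file_name out) := by unfold Spec_get_id_from_file_name_py; infer_instance

-- ===== CLAIM (what is proved, stated in full; the proofs are below) =====
def Claim_equal_get_id_from_file_name_py : Prop := ∀ (file_name : String), Dom_get_id_from_file_name_py file_name → Spec_get_id_from_file_name_py file_name (get_id_from_file_name_py file_name)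

-- ===== LEMMAS AND PROOFS =====
-- A's loop produces exactly the reversed takeWhile-digits prefix of its input,
-- prepended to the accumulator.
theorem pvALoop_eq (rs digits : List Char) :
    pvALoop rs digits = (rs.takeWhile PySem.Chars.isdigit).reverse ++ digits := by
  induction rs generalizing digits with
  | nil => simp [pvALoop]
  | cons c rest ih =>
      by_cases h : PySem.Chars.isdigit c
      · simp [pvALoop, h, ih]
      · simp [pvALoop, h]

-- ===== VERDICT (by name: the statement is the Claim_ definition above) =====
theorem get_id_from_file_name_py_spec : Claim_equal_get_id_from_file_name_py := by
  intro file_name _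
  unfold Spec_get_id_from_file_name_py get_id_from_file_name_py get_id_from_file_name_py_alt
    pvSearchTrailingDigits
  simp [pvALoop_eq]
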